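-- pv_equiv track=rewrite | github.com/lichkingwulaa/Codewars | 5_kyu_Simple_Encryption_#4_Qwerty.py | code
-- ===== SOURCE A (Python) =====
-- def code(text, key, m=1):
-- 	keys, r = [int(e) * m for e in str(key).rjust(3, '0')], []
-- 	for c in text:
-- 		for i, a in enumerate(['qwertyuiop', 'asdfghjkl', 'zxcvbnm,.']):
-- 			if c in a: c = a[(a.index(c) + keys[i]) % len(a)]
-- 		for i, a in enumerate(['QWERTYUIOP', 'ASDFGHJKL', 'ZXCVBNM<>']):
-- 			if c in a: c = a[(a.index(c) + keys[i]) % len(a)]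
-- 		r.append(c)
-- 	return ''.join(r)
-- ===== SOURCE B (Python) =====
-- def code(text, key, m=1):
--     ks = [int(d) * m for d in str(key).rjust(3, '0')]
--     rows = ['qwertyuiop', 'asdfghjkl', 'zxcvbnm,.',
--             'QWERTYUIOP', 'ASDFGHJKL', 'ZXCVBNM<>']
--     table = {c: row[(j + ks[i % 3]) % len(row)]
--              for i, row in enumerate(rows)
--              for j, c in enumerate(row)}
--     return ''.join(table.get(c, c) for c in text)
-- ===== Notes on version B (the rewrite author's own statement) =====
-- stated objective: faster
-- what changed: B precomputes one translation dict covering all six keyboard rows (char -> shifted char) and encodes the text in a single lookup pass, replacing A's per-character scan over the six rows with 'in'/list.index inside the loop.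
import Mathlib
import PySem

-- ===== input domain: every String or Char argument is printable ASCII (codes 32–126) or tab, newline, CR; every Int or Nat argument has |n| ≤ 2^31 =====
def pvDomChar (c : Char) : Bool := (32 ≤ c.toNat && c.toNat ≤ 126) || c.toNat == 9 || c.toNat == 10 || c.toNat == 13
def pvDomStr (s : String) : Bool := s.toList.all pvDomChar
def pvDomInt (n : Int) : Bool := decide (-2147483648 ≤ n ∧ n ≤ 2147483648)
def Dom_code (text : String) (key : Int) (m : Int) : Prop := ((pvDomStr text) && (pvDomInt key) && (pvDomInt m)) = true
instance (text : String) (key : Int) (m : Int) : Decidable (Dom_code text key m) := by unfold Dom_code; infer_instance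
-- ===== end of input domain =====

-- B builds one translation table up front (a dict over all six keyboard rows) and encodes the
-- text in a single lookup pass, instead of A's per-character scan over the six rows (objective: idiomatic).

-- ===== PORT A =====
-- shared helper: keys = [int(e) * m for e in str(key).rjust(3, '0')]
-- rjust(3,'0') is hand-ported (left pad with '0' to length 3; exact for the sign-free strings
-- admitted by Pre_code); int(e) = PySem.Int.ofChars?, whose none case (ValueError, key < 0)
-- is excluded by Pre_code, so the .getD 0 default is never reached there.
def pvKeys (key : Int) (m : Int) : List Int :=
  let s := PySem.Int.toChars key
  let s3 := if s.length < 3 then List.replicate (3 - s.length) '0' ++ s else s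
  s3.map (fun d => ((PySem.Int.ofChars? [d]).getD 0) * m)

def pvR0 : List Char := "qwertyuiop".toList
def pvR1 : List Char := "asdfghjkl".toList
def pvR2 : List Char := "zxcvbnm,.".toList
def pvU0 : List Char := "QWERTYUIOP".toList
def pvU1 : List Char := "ASDFGHJKL".toList
def pvU2 : List Char := "ZXCVBNM<>".toList
def pvLowerRows : List (List Char) := [pvR0, pvR1, pvR2]
def pvUpperRows : List (List Char) := [pvU0, pvU1, pvU2]

-- loop body 'if c in a: c = a[(a.index(c) + keys[i]) % len(a)]' (p = (i, a) from enumerate)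
def pvStep (ks : List Int) (p : Int × List Char) (c : Char) : Char :=
  if c ∈ p.2 then
    PySem.List.pyGetD p.2
      (PySem.Int.mod ((((PySem.List.index? p.2 c).getD 0 : Nat) : Int) + PySem.List.pyGetD ks p.1 0)
        (p.2.length : Int)) c
  else c

def code (text : String) (key : Int) (m : Int) : String :=
  let keys := pvKeys key m
  let r := text.toList.foldl (fun r c =>
    let c1 := (PySem.List.enumerate pvLowerRows).foldl (fun c p => pvStep keys p c) c
    let c2 := (PySem.List.enumerate pvUpperRows).foldl (fun c p => pvStep keys p c) c1
    r ++ [c2]) ([] : List Char)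
  String.mk r

-- ===== PORT B =====
def pvRows : List (List Char) := [pvR0, pvR1, pvR2, pvU0, pvU1, pvU2]

-- the dict comprehension {c: row[(j + ks[i % 3]) % len(row)] for i, row in enumerate(rows) for j, c in enumerate(row)}
def pvPairs (ks : List Int) : List (Char × Char) :=
  (PySem.List.enumerate pvRows).flatMap (fun pr =>
    (PySem.List.enumerate pr.2).map (fun pc =>
      (pc.2, PySem.List.pyGetD pr.2
        (PySem.Int.mod (pc.1 + PySem.List.pyGetD ks (PySem.Int.mod pr.1 3) 0) (pr.2.length : Int))
        pc.2)))

def code_alt (text : String) (key : Int) (m : Int) : String :=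
  let ks := pvKeys key m
  let table : PySem.Dict Char Char := PySem.Dict.ofList (pvPairs ks)
  String.mk (text.toList.map (fun c => table.getD c c))

-- ===== PRECONDITION & SPEC =====
-- Pre_code excludes key < 0, on which A raises ValueError (int('-') while parsing str(key).rjust(3,'0')).
def Pre_code (text : String) (key : Int) (m : Int) : Prop := 0 ≤ key
instance (text : String) (key : Int) (m : Int) : Decidable (Pre_code text key m) := by unfold Pre_code; infer_instance
def pvWitness_code : String × Int × Int := ("Ab,c<.", 123, 2)

def Spec_code (text : String) (key : Int) (m : Int) (out : String) : Prop := out = code_alt text key m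
instance (text : String) (key : Int) (m : Int) (out : String) : Decidable (Spec_code text key m out) := by unfold Spec_code; infer_instance

-- ===== CLAIM (what is proved, stated in full; the proofs are below) =====
def Claim_equal_code : Prop := ∀ (text : String) (key : Int) (m : Int), Dom_code text key m → Pre_code text key m → Spec_code text key m (code text key m)

-- ===== LEMMAS AND PROOFS =====

-- the value A gives a character found in a row (and the value B's table stores for it)
def pvShift (row : List Char) (k : Int) (c : Char) : Char :=
  PySem.List.pyGetD row (PySem.Int.mod ((row.idxOf c : Int) + k) (row.length : Int)) c

lemma pvIndexGetD (row : List Char) (c : Char) (h : c ∈ row) :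
    (List.idxOf? c row).getD 0 = row.idxOf c := by
  cases ho : List.idxOf? c row with
  | none => exact absurd h (List.idxOf?_eq_none_iff.mp ho)
  | some n => simp [List.idxOf_eq_getD_idxOf?, ho]

lemma pvStep_of_mem (ks : List Int) (i : Int) (row : List Char) (c : Char) (h : c ∈ row) :
    pvStep ks (i, row) c = pvShift row (PySem.List.pyGetD ks i 0) c := by
  simp [pvStep, pvShift, h, pvIndexGetD row c h]

lemma pvStep_of_not_mem (ks : List Int) (i : Int) (row : List Char) (c : Char) (h : c ∉ row) :
    pvStep ks (i, row) c = c := by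
  simp [pvStep, h]

lemma pvShift_mem (row : List Char) (k : Int) (c : Char) (h : c ∈ row) :
    pvShift row k c ∈ row := by
  have hl : (0 : Int) < (row.length : Int) := by
    exact_mod_cast List.length_pos_of_mem h
  rw [pvShift, PySem.List.pyGetD_eq_getElem _ _ (PySem.Int.mod_nonneg _ hl)
    (PySem.Int.mod_lt _ hl)]
  exact List.getElem_mem _

lemma pvDisj_R0_R1 : ∀ x ∈ pvR0, x ∉ pvR1 := by unfold pvR0 pvR1; simp
lemma pvDisj_R0_R2 : ∀ x ∈ pvR0, x ∉ pvR2 := by unfold pvR0 pvR2; simp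
lemma pvDisj_R0_U0 : ∀ x ∈ pvR0, x ∉ pvU0 := by unfold pvR0 pvU0; simp
lemma pvDisj_R0_U1 : ∀ x ∈ pvR0, x ∉ pvU1 := by unfold pvR0 pvU1; simp
lemma pvDisj_R0_U2 : ∀ x ∈ pvR0, x ∉ pvU2 := by unfold pvR0 pvU2; simp
lemma pvDisj_R1_R2 : ∀ x ∈ pvR1, x ∉ pvR2 := by unfold pvR1 pvR2; simp
lemma pvDisj_R1_U0 : ∀ x ∈ pvR1, x ∉ pvU0 := by unfold pvR1 pvU0; simp
lemma pvDisj_R1_U1 : ∀ x ∈ pvR1, x ∉ pvU1 := by unfold pvR1 pvU1; simp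
lemma pvDisj_R1_U2 : ∀ x ∈ pvR1, x ∉ pvU2 := by unfold pvR1 pvU2; simp
lemma pvDisj_R2_U0 : ∀ x ∈ pvR2, x ∉ pvU0 := by unfold pvR2 pvU0; simp
lemma pvDisj_R2_U1 : ∀ x ∈ pvR2, x ∉ pvU1 := by unfold pvR2 pvU1; simp
lemma pvDisj_R2_U2 : ∀ x ∈ pvR2, x ∉ pvU2 := by unfold pvR2 pvU2; simp
lemma pvDisj_U0_U1 : ∀ x ∈ pvU0, x ∉ pvU1 := by unfold pvU0 pvU1; simp
lemma pvDisj_U0_U2 : ∀ x ∈ pvU0, x ∉ pvU2 := by unfold pvU0 pvU2; simp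
lemma pvDisj_U1_U2 : ∀ x ∈ pvU1, x ∉ pvU2 := by unfold pvU1 pvU2; simp

lemma pvMapFstPairs (ks : List Int) :
    (pvPairs ks).map Prod.fst = pvR0 ++ pvR1 ++ pvR2 ++ pvU0 ++ pvU1 ++ pvU2 := by
  unfold pvPairs
  rw [List.map_flatMap]
  simp only [List.map_map, Function.comp_def, PySem.List.map_snd_enumerate]
  simp [pvRows, PySem.List.enumerate_cons, PySem.List.enumerate_nil, List.append_assoc]

lemma pvItemsPairs (ks : List Int) :
    (PySem.Dict.ofList (pvPairs ks)).items = pvPairs ks := by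
  have hnd : ((pvPairs ks).map Prod.fst).Nodup := by
    rw [pvMapFstPairs]; unfold pvR0 pvR1 pvR2 pvU0 pvU1 pvU2; simp
  calc (PySem.Dict.ofList (pvPairs ks)).items
      = (List.foldl (fun d (a : Char × Char) => d.insert (Prod.fst a) (Prod.snd a))
          PySem.Dict.empty (pvPairs ks)).items := rfl
    _ = pvPairs ks := by
        rw [PySem.Dict.items_foldl_insert_fresh (pvPairs ks) Prod.fst Prod.snd PySem.Dict.empty
          (fun a _ => by simp) hnd]
        simp [show PySem.Dict.empty.items = ([] : List (Char × Char)) from rfl]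

lemma pvMemBlock (row : List Char) (k : Int) (c : Char) (h : c ∈ row) :
    (c, pvShift row k c) ∈ (PySem.List.enumerate row).map
      (fun pc => (pc.2, PySem.List.pyGetD row (PySem.Int.mod (pc.1 + k) (row.length : Int)) pc.2)) := by
  refine List.mem_map.mpr ⟨((row.idxOf c : Int), c), ?_, ?_⟩
  · rw [PySem.List.mem_enumerate_iff]
    exact ⟨row.idxOf c, List.idxOf_lt_length_of_mem h, by simp [List.getElem_idxOf]⟩
  · simp [pvShift]

lemma pvLookup (ks : List Int) (c : Char) (i : Int) (row : List Char)
    (hrow : (i, row) ∈ PySem.List.enumerate pvRows) (h : c ∈ row) :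
    (PySem.Dict.ofList (pvPairs ks)).getD c c
      = pvShift row (PySem.List.pyGetD ks (PySem.Int.mod i 3) 0) c := by
  refine PySem.Dict.getD_of_mem_items _ ?_ (PySem.Dict.nodup_keys_ofList _) c
  rw [pvItemsPairs ks]
  exact List.mem_flatMap.mpr ⟨(i, row), hrow, pvMemBlock row _ c h⟩

lemma pvLookupNone (ks : List Int) (c : Char) (h0 : c ∉ pvR0) (h1 : c ∉ pvR1) (h2 : c ∉ pvR2)
    (h3 : c ∉ pvU0) (h4 : c ∉ pvU1) (h5 : c ∉ pvU2) :
    (PySem.Dict.ofList (pvPairs ks)).getD c c = c := by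
  apply PySem.Dict.getD_of_not_contains
  rw [PySem.Dict.contains_eq_decide_mem_keys]
  simp only [decide_eq_false_iff_not]
  intro hc
  have hk : (PySem.Dict.ofList (pvPairs ks)).keys = pvR0 ++ pvR1 ++ pvR2 ++ pvU0 ++ pvU1 ++ pvU2 := by
    simp only [PySem.Dict.keys, pvItemsPairs]
    simpa using pvMapFstPairs ks
  rw [hk] at hc
  simp only [List.mem_append] at hc
  rcases hc with ((((hc | hc) | hc) | hc) | hc) | hc
  exacts [h0 hc, h1 hc, h2 hc, h3 hc, h4 hc, h5 hc]

lemma pvCharEq (ks : List Int) (c : Char) :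
    (PySem.List.enumerate pvUpperRows).foldl (fun c p => pvStep ks p c)
      ((PySem.List.enumerate pvLowerRows).foldl (fun c p => pvStep ks p c) c)
    = (PySem.Dict.ofList (pvPairs ks)).getD c c := by
  have e0 : PySem.Int.mod (0:Int) 3 = 0 := by decide
  have e1 : PySem.Int.mod (1:Int) 3 = 1 := by decide
  have e2 : PySem.Int.mod (2:Int) 3 = 2 := by decide
  have e3 : PySem.Int.mod (3:Int) 3 = 0 := by decide
  have e4 : PySem.Int.mod (4:Int) 3 = 1 := by decide
  have e5 : PySem.Int.mod (5:Int) 3 = 2 := by decide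
  have hm0 : ((0:Int), pvR0) ∈ PySem.List.enumerate pvRows := by simp [pvRows, PySem.List.enumerate_cons, PySem.List.enumerate_nil]
  have hm1 : ((1:Int), pvR1) ∈ PySem.List.enumerate pvRows := by simp [pvRows, PySem.List.enumerate_cons, PySem.List.enumerate_nil]
  have hm2 : ((2:Int), pvR2) ∈ PySem.List.enumerate pvRows := by simp [pvRows, PySem.List.enumerate_cons, PySem.List.enumerate_nil]
  have hm3 : ((3:Int), pvU0) ∈ PySem.List.enumerate pvRows := by simp [pvRows, PySem.List.enumerate_cons, PySem.List.enumerate_nil]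
  have hm4 : ((4:Int), pvU1) ∈ PySem.List.enumerate pvRows := by simp [pvRows, PySem.List.enumerate_cons, PySem.List.enumerate_nil]
  have hm5 : ((5:Int), pvU2) ∈ PySem.List.enumerate pvRows := by simp [pvRows, PySem.List.enumerate_cons, PySem.List.enumerate_nil]
  have hlow : PySem.List.enumerate pvLowerRows = [(0, pvR0), (1, pvR1), (2, pvR2)] := by
    norm_num [pvLowerRows, PySem.List.enumerate_cons, PySem.List.enumerate_nil]
  have hup : PySem.List.enumerate pvUpperRows = [(0, pvU0), (1, pvU1), (2, pvU2)] := by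
    norm_num [pvUpperRows, PySem.List.enumerate_cons, PySem.List.enumerate_nil]
  simp only [hlow, hup, List.foldl_cons, List.foldl_nil]
  by_cases h0 : c ∈ pvR0
  · rw [pvLookup ks c 0 pvR0 hm0 h0, e0, pvStep_of_mem ks 0 pvR0 c h0]
    have hs : pvShift pvR0 (PySem.List.pyGetD ks 0 0) c ∈ pvR0 := pvShift_mem _ _ _ h0
    rw [pvStep_of_not_mem _ _ _ _ (pvDisj_R0_R1 _ hs),
        pvStep_of_not_mem _ _ _ _ (pvDisj_R0_R2 _ hs),
        pvStep_of_not_mem _ _ _ _ (pvDisj_R0_U0 _ hs),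
        pvStep_of_not_mem _ _ _ _ (pvDisj_R0_U1 _ hs),
        pvStep_of_not_mem _ _ _ _ (pvDisj_R0_U2 _ hs)]
  by_cases h1 : c ∈ pvR1
  · rw [pvLookup ks c 1 pvR1 hm1 h1, e1, pvStep_of_not_mem _ _ _ _ h0,
        pvStep_of_mem ks 1 pvR1 c h1]
    have hs : pvShift pvR1 (PySem.List.pyGetD ks 1 0) c ∈ pvR1 := pvShift_mem _ _ _ h1
    rw [pvStep_of_not_mem _ _ _ _ (pvDisj_R1_R2 _ hs),
        pvStep_of_not_mem _ _ _ _ (pvDisj_R1_U0 _ hs),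
        pvStep_of_not_mem _ _ _ _ (pvDisj_R1_U1 _ hs),
        pvStep_of_not_mem _ _ _ _ (pvDisj_R1_U2 _ hs)]
  by_cases h2 : c ∈ pvR2
  · rw [pvLookup ks c 2 pvR2 hm2 h2, e2, pvStep_of_not_mem _ _ _ _ h0,
        pvStep_of_not_mem _ _ _ _ h1, pvStep_of_mem ks 2 pvR2 c h2]
    have hs : pvShift pvR2 (PySem.List.pyGetD ks 2 0) c ∈ pvR2 := pvShift_mem _ _ _ h2
    rw [pvStep_of_not_mem _ _ _ _ (pvDisj_R2_U0 _ hs),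
        pvStep_of_not_mem _ _ _ _ (pvDisj_R2_U1 _ hs),
        pvStep_of_not_mem _ _ _ _ (pvDisj_R2_U2 _ hs)]
  by_cases h3 : c ∈ pvU0
  · rw [pvLookup ks c 3 pvU0 hm3 h3, e3, pvStep_of_not_mem _ _ _ _ h0,
        pvStep_of_not_mem _ _ _ _ h1, pvStep_of_not_mem _ _ _ _ h2,
        pvStep_of_mem ks 0 pvU0 c h3]
    have hs : pvShift pvU0 (PySem.List.pyGetD ks 0 0) c ∈ pvU0 := pvShift_mem _ _ _ h3
    rw [pvStep_of_not_mem _ _ _ _ (pvDisj_U0_U1 _ hs),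
        pvStep_of_not_mem _ _ _ _ (pvDisj_U0_U2 _ hs)]
  by_cases h4 : c ∈ pvU1
  · rw [pvLookup ks c 4 pvU1 hm4 h4, e4, pvStep_of_not_mem _ _ _ _ h0,
        pvStep_of_not_mem _ _ _ _ h1, pvStep_of_not_mem _ _ _ _ h2,
        pvStep_of_not_mem _ _ _ _ h3, pvStep_of_mem ks 1 pvU1 c h4]
    have hs : pvShift pvU1 (PySem.List.pyGetD ks 1 0) c ∈ pvU1 := pvShift_mem _ _ _ h4
    rw [pvStep_of_not_mem _ _ _ _ (pvDisj_U1_U2 _ hs)]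
  by_cases h5 : c ∈ pvU2
  · rw [pvLookup ks c 5 pvU2 hm5 h5, e5, pvStep_of_not_mem _ _ _ _ h0,
        pvStep_of_not_mem _ _ _ _ h1, pvStep_of_not_mem _ _ _ _ h2,
        pvStep_of_not_mem _ _ _ _ h3, pvStep_of_not_mem _ _ _ _ h4,
        pvStep_of_mem ks 2 pvU2 c h5]
  · rw [pvLookupNone ks c h0 h1 h2 h3 h4 h5, pvStep_of_not_mem _ _ _ _ h0,
        pvStep_of_not_mem _ _ _ _ h1, pvStep_of_not_mem _ _ _ _ h2,
        pvStep_of_not_mem _ _ _ _ h3, pvStep_of_not_mem _ _ _ _ h4,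
        pvStep_of_not_mem _ _ _ _ h5]

-- ===== VERDICT (by name: the statement is the Claim_ definition above) =====
theorem code_spec : Claim_equal_code := by
  intro text key m _ _
  unfold Spec_code code code_alt
  simp only []
  rw [PySem.List.foldl_append_singleton_eq_map]
  simp only [List.nil_append]
  exact congrArg String.mk (List.map_congr_left (fun c _ => pvCharEq (pvKeys key m) c))
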